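-- pv_equiv track=rewrite | github.com/ElchaabiMohamed/InferCode_SVM | NC-5690-python-files/program_4692.py | phrasePalindrome
-- ===== SOURCE A (Python) =====
-- def phrasePalindrome(phrase):
--   i=0
--   ok=True
--   sansespace=''
--   for lettre in phrase:
--     if lettre!=' ':
--       sansespace+=lettre
--   while i<len(sansespace)//2 and ok:
--     ok=sansespace[i]==sansespace[-i-1]
--     i+=1
--   return ok
-- ===== SOURCE B (Python) =====
-- def phrasePalindrome(phrase):
--   cleaned = ''.join(c for c in phrase if c != ' ')
--   return cleaned == cleaned[::-1]
-- ===== Notes on version B (the rewrite author's own statement) =====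
-- stated objective: idiomatic
-- what changed: Replaces the index-based inward two-pointer while-loop with a single reverse-and-compare of the space-free string built by a join over a filtering generator.
import Mathlib
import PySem

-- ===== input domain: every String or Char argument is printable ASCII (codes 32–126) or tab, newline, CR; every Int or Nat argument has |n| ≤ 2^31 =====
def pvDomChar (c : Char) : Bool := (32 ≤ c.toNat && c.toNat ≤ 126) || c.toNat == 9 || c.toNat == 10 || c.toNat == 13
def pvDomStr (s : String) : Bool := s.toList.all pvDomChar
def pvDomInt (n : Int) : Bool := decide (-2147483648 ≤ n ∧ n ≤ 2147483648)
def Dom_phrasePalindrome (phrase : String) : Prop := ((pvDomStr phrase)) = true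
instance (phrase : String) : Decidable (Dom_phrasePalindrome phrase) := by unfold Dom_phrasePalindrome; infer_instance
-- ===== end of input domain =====

-- B replaces A's index-based inward two-pointer while-loop by building the cleaned
-- string once and comparing it with its reversal (idiomatic; same cost).

-- ===== PORT A =====
-- the while loop: while i < len(sansespace)//2 and ok: ok = sansespace[i]==sansespace[-i-1]; i+=1
def pvLoopA (l : List Char) (i : Nat) (ok : Bool) : Bool :=
  if i < l.length / 2 ∧ ok = true then
    pvLoopA l (i + 1)
      (PySem.List.pyGetD l (i : Int) ' ' == PySem.List.pyGetD l (-(i : Int) - 1) ' ')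
  else ok
termination_by l.length / 2 - i

def phrasePalindrome (phrase : String) : Bool :=
  -- for lettre in phrase: if lettre != ' ': sansespace += lettre
  let sansespace : List Char :=
    phrase.toList.foldl (fun acc c => if c ≠ ' ' then acc ++ [c] else acc) []
  pvLoopA sansespace 0 true

-- ===== PORT B =====
def phrasePalindrome_alt (phrase : String) : Bool :=
  let cleaned : List Char := phrase.toList.filter (fun c => c ≠ ' ')
  cleaned == cleaned.reverse

-- ===== PRECONDITION & SPEC =====
def Spec_phrasePalindrome (phrase : String) (out : Bool) : Prop := out = phrasePalindrome_alt phrase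
instance (phrase : String) (out : Bool) : Decidable (Spec_phrasePalindrome phrase out) := by unfold Spec_phrasePalindrome; infer_instance

-- ===== CLAIM (what is proved, stated in full; the proofs are below) =====
def Claim_equal_phrasePalindrome : Prop := ∀ (phrase : String), Dom_phrasePalindrome phrase → Spec_phrasePalindrome phrase (phrasePalindrome phrase)

-- ===== LEMMAS AND PROOFS =====

theorem pvLoopA_spec (l : List Char) (i : Nat) :
    pvLoopA l i true =
      decide (∀ j, i ≤ j → j < l.length / 2 → l[j]? = l[l.length - 1 - j]?) := by
  by_cases h : i < l.length / 2
  · rw [pvLoopA]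
    simp only [h, and_self, if_true]
    have hi : (i : Nat) < l.length := by omega
    have hneg : PySem.List.pyGetD l (-(i : Int) - 1) ' ' = l[l.length - (i + 1)] := by
      have he : (-(i : Int) - 1) = -((i + 1 : Nat) : Int) := by push_cast; ring
      rw [he, PySem.List.pyGetD_neg_natCast l (i + 1) ' ' (by omega) (by omega)]
    have hpos : PySem.List.pyGetD l (i : Int) ' ' = l[i] := by
      rw [PySem.List.pyGetD_natCast l i ' ', List.getD_eq_getElem l ' ' hi]
    rw [hpos, hneg]
    by_cases hc : l[i] = l[l.length - (i + 1)]
    · have hb : (l[i] == l[l.length - (i + 1)]) = true := by simp [hc]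
      rw [hb, pvLoopA_spec l (i + 1)]
      have hiff : (∀ j, i < j → j < l.length / 2 → l[j]? = l[l.length - 1 - j]?) ↔
          (∀ j, i ≤ j → j < l.length / 2 → l[j]? = l[l.length - 1 - j]?) := by
        constructor
        · intro H j hij hj
          by_cases hji : j = i
          · subst hji
            have h1 : l.length - 1 - j = l.length - (j + 1) := by omega
            rw [h1, List.getElem?_eq_getElem hi, List.getElem?_eq_getElem (by omega)]
            simpa using hc
          · exact H j (by omega) hj
        · intro H j hij hj; exact H j (by omega) hj
      simp only [Nat.add_one_le_iff] at *
      rw [decide_eq_decide]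
      exact hiff
    · have hb : (l[i] == l[l.length - (i + 1)]) = false := by simp [hc]
      rw [hb, pvLoopA]
      simp only [Bool.false_eq_true, and_false, if_false]
      symm
      simp only [decide_eq_false_iff_not]
      intro H
      apply hc
      have := H i (le_refl i) h
      have h1 : l.length - 1 - i = l.length - (i + 1) := by omega
      rw [h1, List.getElem?_eq_getElem hi, List.getElem?_eq_getElem (by omega)] at this
      exact Option.some.injEq _ _ ▸ (by simpa using this)
  · rw [pvLoopA]
    simp only [h, false_and, if_false]
    symm
    simp only [decide_eq_true_eq]
    intro j hij hj
    omega
termination_by l.length / 2 - i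

theorem palindrome_half_iff (l : List Char) :
    (l = l.reverse) ↔ (∀ j, j < l.length / 2 → l[j]? = l[l.length - 1 - j]?) := by
  constructor
  · intro h j hj
    conv_lhs => rw [h]
    rw [List.getElem?_reverse (by omega)]
  · intro H
    apply List.ext_getElem?
    intro j
    by_cases hj : j < l.length
    · rw [List.getElem?_reverse hj]
      by_cases hhalf : j < l.length / 2
      · exact H j hhalf
      · set j' := l.length - 1 - j with hj'
        by_cases hh2 : j' < l.length / 2
        · have := H j' hh2
          have : l[j']? = l[j]? := by
            have h2 : l.length - 1 - j' = j := by omega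
            rwa [h2] at this
          exact this.symm
        · have : j = j' := by omega
          rw [this]
    · rw [List.getElem?_eq_none (by simpa using Nat.le_of_not_lt hj),
          List.getElem?_eq_none]
      simp
      omega

-- ===== VERDICT (by name: the statement is the Claim_ definition above) =====
theorem phrasePalindrome_spec : Claim_equal_phrasePalindrome := by
  intro phrase _
  unfold Spec_phrasePalindrome phrasePalindrome phrasePalindrome_alt
  rw [PySem.List.foldl_append_ite_eq_filter]
  simp only [List.nil_append]
  set l := phrase.toList.filter (fun c => c ≠ ' ') with hl
  rw [pvLoopA_spec l 0]
  rw [Bool.eq_iff_iff]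
  simp only [decide_eq_true_eq, beq_iff_eq]
  rw [palindrome_half_iff]
  exact ⟨fun H j hj => H j (Nat.zero_le j) hj, fun H j _ hj => H j hj⟩
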